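-- pv_equiv track=rewrite | github.com/Thyxx/LotteryPrediction | app/data_fetcher.py | _looks_like_lotto_header
-- ===== SOURCE A (Python) =====
-- from typing import Dict, Iterable, List, Optional, Tuple
--
-- def _looks_like_lotto_header(headers: List[str]) -> bool:
--     if not headers:
--         return False
--     has_date = any("date" in header for header in headers)
--     main_candidates = sum(
--         1
--         for header in headers
--         if header.startswith(("boule", "numero", "num", "n_")) and "tirage" not in header
--     )
--     has_extra = any(
--         keyword in header
--         for keyword in ("chance", "bonus", "complementaire")
--         for header in headers
--     )
--     return has_date and main_candidates >= 5 and has_extra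
-- ===== SOURCE B (Python) =====
-- _RULES = (
--     ("date", "date"),
--     ("chance", "extra"),
--     ("bonus", "extra"),
--     ("complementaire", "extra"),
-- )
-- _MAIN_PREFIXES = ("boule", "numero", "num", "n_")
--
--
-- def _tags(header):
--     tags = {tag for needle, tag in _RULES if needle in header}
--     if header.startswith(_MAIN_PREFIXES) and "tirage" not in header:
--         tags.add("main")
--     return tags
--
--
-- def _looks_like_lotto_header(headers):
--     tags = [tag for header in headers for tag in _tags(header)]
--     return tags.count("date") >= 1 and tags.count("main") >= 5 and tags.count("extra") >= 1
-- ===== Notes on version B (the rewrite author's own statement) =====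
-- stated objective: alternative
-- what changed: Replaces A's three hardcoded boolean scans (two any-generators and a sum) with a declarative rule table that classifies each header into a set of tags ('date'/'main'/'extra'), flattens the tag sets into one list, and decides via three count thresholds on that tag multiset.
import Mathlib
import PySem

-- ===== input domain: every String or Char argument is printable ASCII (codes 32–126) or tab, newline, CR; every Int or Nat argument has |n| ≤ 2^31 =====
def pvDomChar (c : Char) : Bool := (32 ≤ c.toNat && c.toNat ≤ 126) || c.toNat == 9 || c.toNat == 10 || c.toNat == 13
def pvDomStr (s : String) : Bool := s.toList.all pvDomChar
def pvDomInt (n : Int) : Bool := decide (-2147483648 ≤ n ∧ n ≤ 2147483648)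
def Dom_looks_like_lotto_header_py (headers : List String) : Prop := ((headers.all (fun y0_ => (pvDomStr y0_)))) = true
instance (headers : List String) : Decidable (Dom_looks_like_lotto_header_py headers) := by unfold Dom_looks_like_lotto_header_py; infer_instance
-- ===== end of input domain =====

-- B replaces A's three hardcoded boolean scans by a rule table classifying each
-- header into a tag set, flattened and judged by count thresholds; objective: alternative.

-- ===== PORT A =====
def looks_like_lotto_header_py (headers : List String) : Bool :=
  if headers = [] then false
  else
    let has_date := headers.any (fun h => PySem.Str.isIn "date" h)
    let main_candidates := headers.countP (fun h =>
      (PySem.Str.startswith h "boule" || PySem.Str.startswith h "numero" ||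
       PySem.Str.startswith h "num" || PySem.Str.startswith h "n_") &&
      !(PySem.Str.isIn "tirage" h))
    let has_extra := ["chance", "bonus", "complementaire"].any
      (fun kw => headers.any (fun h => PySem.Str.isIn kw h))
    has_date && decide (5 ≤ main_candidates) && has_extra

-- ===== PORT B =====
def pvRules : List (String × String) :=
  [("date", "date"), ("chance", "extra"), ("bonus", "extra"), ("complementaire", "extra")]

def pvMainPrefixes : List String := ["boule", "numero", "num", "n_"]

def pvTags (h : String) : PySem.Set String :=
  let tags := PySem.Set.ofList ((pvRules.filter (fun r => PySem.Str.isIn r.1 h)).map (·.2))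
  if pvMainPrefixes.any (fun p => PySem.Str.startswith h p) && !(PySem.Str.isIn "tirage" h)
  then PySem.Set.add tags "main" else tags

def looks_like_lotto_header_py_alt (headers : List String) : Bool :=
  let tags := headers.flatMap (fun h => pvTags h)
  decide (1 ≤ tags.count "date") && decide (5 ≤ tags.count "main") &&
    decide (1 ≤ tags.count "extra")

-- ===== PRECONDITION & SPEC =====
def Spec_looks_like_lotto_header_py (headers : List String) (out : Bool) : Prop := out = looks_like_lotto_header_py_alt headers
instance (headers : List String) (out : Bool) : Decidable (Spec_looks_like_lotto_header_py headers out) := by unfold Spec_looks_like_lotto_header_py; infer_instance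

-- ===== CLAIM (what is proved, stated in full; the proofs are below) =====
def Claim_equal_looks_like_lotto_header_py : Prop := ∀ (headers : List String), Dom_looks_like_lotto_header_py headers → Spec_looks_like_lotto_header_py headers (looks_like_lotto_header_py headers)

-- ===== LEMMAS AND PROOFS =====
-- predicates matching A's three scans
def pvIsDate (h : String) : Bool := PySem.Str.isIn "date" h
def pvIsMain (h : String) : Bool :=
  (PySem.Str.startswith h "boule" || PySem.Str.startswith h "numero" ||
   PySem.Str.startswith h "num" || PySem.Str.startswith h "n_") &&
  !(PySem.Str.isIn "tirage" h)
def pvIsExtra (h : String) : Bool :=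
  PySem.Str.isIn "chance" h || PySem.Str.isIn "bonus" h || PySem.Str.isIn "complementaire" h

lemma pvTags_nodup (h : String) : (pvTags h).Nodup := by
  unfold pvTags
  split
  · exact PySem.Set.nodup_add _ _ (PySem.Set.nodup_ofList _)
  · exact PySem.Set.nodup_ofList _

lemma pvTags_mem_date (h : String) : ("date" ∈ pvTags h) ↔ pvIsDate h = true := by
  unfold pvTags pvRules pvMainPrefixes pvIsDate
  split <;>
    simp [PySem.Set.mem_ofList, List.mem_filter]

lemma pvTags_mem_main (h : String) : ("main" ∈ pvTags h) ↔ pvIsMain h = true := by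
  unfold pvTags pvRules pvMainPrefixes pvIsMain
  split <;>
    simp_all [PySem.Set.mem_ofList, List.mem_filter] <;> tauto

lemma pvTags_mem_extra (h : String) : ("extra" ∈ pvTags h) ↔ pvIsExtra h = true := by
  unfold pvTags pvRules pvMainPrefixes pvIsExtra
  split <;>
    simp [PySem.Set.mem_ofList, List.mem_filter] <;> tauto

lemma pvTags_count (h t : String) (p : String → Bool) (hm : (t ∈ pvTags h) ↔ p h = true) :
    (pvTags h).count t = (if p h then 1 else 0) := by
  rw [(pvTags_nodup h).count]
  by_cases hp : p h = true
  · rw [if_pos (hm.mpr hp), if_pos hp]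
  · rw [if_neg (fun hmem => hp (hm.mp hmem)), if_neg (by simpa using hp)]

-- counting a tag in the flattened tag list = counting qualifying headers
lemma pv_flat_count (headers : List String) (t : String) (p : String → Bool)
    (hp : ∀ h, (pvTags h).count t = (if p h then 1 else 0)) :
    (headers.flatMap (fun h => pvTags h)).count t = headers.countP p := by
  induction headers with
  | nil => rfl
  | cons h rest ih =>
      simp only [List.flatMap_cons, List.count_append, List.countP_cons, ih, hp h]
      split <;> omega

lemma pv_one_le_countP {α : Type} (p : α → Bool) (l : List α) :
    decide (1 ≤ l.countP p) = l.any p := by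
  induction l with
  | nil => simp
  | cons x t ih =>
      simp only [List.countP_cons, List.any_cons, ← ih]
      cases p x <;> simp

-- A's nested has_extra (keywords outer, headers inner) equals the per-header disjunction
lemma pv_extra_comm (headers : List String) :
    (["chance", "bonus", "complementaire"].any
      (fun kw => headers.any (fun h => PySem.Str.isIn kw h)))
    = headers.any pvIsExtra := by
  induction headers with
  | nil => simp
  | cons h t ih =>
      simp only [List.any_cons, List.any_nil, Bool.or_false, pvIsExtra] at ih ⊢
      rw [← ih]
      cases h1 : PySem.Str.isIn "chance" h <;> cases h2 : PySem.Str.isIn "bonus" h <;>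
        cases h3 : PySem.Str.isIn "complementaire" h <;> simp

-- ===== VERDICT (by name: the statement is the Claim_ definition above) =====
theorem looks_like_lotto_header_py_spec : Claim_equal_looks_like_lotto_header_py := by
  intro headers _
  unfold Spec_looks_like_lotto_header_py looks_like_lotto_header_py looks_like_lotto_header_py_alt
  dsimp only
  rw [pv_flat_count headers "date" pvIsDate (fun h => pvTags_count h _ _ (pvTags_mem_date h)),
      pv_flat_count headers "main" pvIsMain (fun h => pvTags_count h _ _ (pvTags_mem_main h)),
      pv_flat_count headers "extra" pvIsExtra (fun h => pvTags_count h _ _ (pvTags_mem_extra h)),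
      pv_one_le_countP, pv_one_le_countP]
  cases headers with
  | nil => simp
  | cons h t =>
      simp only [if_neg (by simp : ¬(h :: t = []))]
      rw [pv_extra_comm]
      rfl
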